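-- pv_equiv track=rewrite | github.com/cristian007369/quiz_funciones_abril24 | quiz_ejercicio3.py | verificar_curiosidad_matematica
-- ===== SOURCE A (Python) =====
-- def verificar_curiosidad_matematica(n):
--     suma=0
--     rta=f"La suma n primeros números impares: "
--     for i in range(1,n*2,2):
--         suma+=i
--         if suma==n**2:
--             rta+=f"{i} = {suma}"
--             break
--         rta+=f"{i} + "
--     return(n**2,rta)
-- ===== SOURCE B (Python) =====
-- def verificar_curiosidad_matematica(n):
--     rta = f"La suma n primeros números impares: "
--     odds = list(range(1, n*2, 2))
--     if odds:
--         rta += " + ".join(str(i) for i in odds) + " = " + str(n**2)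
--     return (n**2, rta)
-- ===== Notes on version B (the rewrite author's own statement) =====
-- stated objective: simpler
-- what changed: Drops A's running-sum accumulator and the per-iteration equality/break check, using the closed fact that the first n odd numbers always sum to n squared: B precomputes the odd list and builds the string with one join plus a final ' = (square)' suffix.
import Mathlib
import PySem

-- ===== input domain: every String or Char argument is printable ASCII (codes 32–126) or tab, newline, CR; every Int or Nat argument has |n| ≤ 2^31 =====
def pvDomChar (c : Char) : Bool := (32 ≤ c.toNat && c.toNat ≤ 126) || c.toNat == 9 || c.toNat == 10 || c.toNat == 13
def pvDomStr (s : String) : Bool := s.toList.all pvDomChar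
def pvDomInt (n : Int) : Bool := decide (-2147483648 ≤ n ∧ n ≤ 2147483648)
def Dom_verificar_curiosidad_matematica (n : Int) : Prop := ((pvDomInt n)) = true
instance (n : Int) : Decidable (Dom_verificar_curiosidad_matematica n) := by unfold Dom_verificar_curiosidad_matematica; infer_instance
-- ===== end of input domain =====

-- B replaces A's running-sum accumulator and per-iteration equality/break check with a
-- direct join over the precomputed odd list ended by ' = n**2' (objective: simpler).

-- ===== PORT A =====
-- the for-loop of A, with the break modelled by returning immediately from the branch
def pvA_loop (nsq : Int) : List Int → Int → String → String
  | [], _, rta => rta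
  | i :: rest, suma, rta =>
    let suma' := suma + i
    if suma' = nsq then rta ++ PySem.Int.toStr i ++ " = " ++ PySem.Int.toStr suma'
    else pvA_loop nsq rest suma' (rta ++ PySem.Int.toStr i ++ " + ")

def verificar_curiosidad_matematica (n : Int) : Int × String :=
  (n ^ 2, pvA_loop (n ^ 2) (PySem.List.pyRange 1 (n * 2) 2) 0 "La suma n primeros números impares: ")

-- ===== PORT B =====
def verificar_curiosidad_matematica_alt (n : Int) : Int × String :=
  let rta := "La suma n primeros números impares: "
  let odds := PySem.List.pyRange 1 (n * 2) 2
  if odds.isEmpty then (n ^ 2, rta)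
  else (n ^ 2, rta ++ PySem.Str.join " + " (odds.map PySem.Int.toStr) ++ " = " ++ PySem.Int.toStr (n ^ 2))

-- ===== PRECONDITION & SPEC =====
def Spec_verificar_curiosidad_matematica (n : Int) (out : Int × String) : Prop := out = verificar_curiosidad_matematica_alt n
instance (n : Int) (out : Int × String) : Decidable (Spec_verificar_curiosidad_matematica n out) := by unfold Spec_verificar_curiosidad_matematica; infer_instance

-- ===== CLAIM (what is proved, stated in full; the proofs are below) =====
def Claim_equal_verificar_curiosidad_matematica : Prop := ∀ (n : Int), Dom_verificar_curiosidad_matematica n → Spec_verificar_curiosidad_matematica n (verificar_curiosidad_matematica n)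

-- ===== LEMMAS AND PROOFS =====

theorem pyRange_two_cons (a b : Int) (h : a < b) : PySem.List.pyRange a b 2 = a :: PySem.List.pyRange (a+2) b 2 := by
  simp only [PySem.List.pyRange]
  norm_num
  rw [if_pos h]
  by_cases h2 : a + 2 < b
  · rw [if_pos h2]
    have hm : ((b - a + 2 - 1) / 2).toNat = ((b - (a+2) + 2 - 1) / 2).toNat + 1 := by omega
    rw [hm, List.range_succ_eq_map]
    simp [List.map_map, Function.comp_def]
    intro k _; ring
  · rw [if_neg h2]
    have hm : ((b - a + 2 - 1) / 2).toNat = 1 := by omega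
    rw [hm]
    simp

theorem pyRange_two_nil (a b : Int) (h : b ≤ a) : PySem.List.pyRange a b 2 = [] := by
  simp only [PySem.List.pyRange]
  norm_num
  omega

theorem join_singleton' (sep a : String) : PySem.Str.join sep [a] = a := by
  simp [PySem.Str.join, PySem.Chars.join, List.intercalate]

theorem join_cons' (sep a : String) (rest : List String) (h : rest ≠ []) :
    PySem.Str.join sep (a :: rest) = a ++ sep ++ PySem.Str.join sep rest := by
  cases rest with
  | nil => simp at h
  | cons b t =>
    simp [PySem.Str.join, PySem.Chars.join, List.intercalate]
    rw [String.append_assoc]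

theorem loop_eq (m : Nat) : ∀ (n : Int) (k : Nat) (rta : String), (k : Int) < n → (n - k).toNat ≤ m →
    pvA_loop (n ^ 2) (PySem.List.pyRange (2 * k + 1) (2 * n) 2) ((k : Int) ^ 2) rta
      = rta ++ PySem.Str.join " + " ((PySem.List.pyRange (2 * k + 1) (2 * n) 2).map PySem.Int.toStr)
          ++ " = " ++ PySem.Int.toStr (n ^ 2) := by
  induction m with
  | zero => intro n k rta hk hm; omega
  | succ m ih =>
    intro n k rta hk hm
    have hcons := pyRange_two_cons (2 * k + 1) (2 * n) (by omega)
    rw [hcons]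
    have hsum : ((k : Int) ^ 2 + (2 * k + 1)) = ((k : Int) + 1) ^ 2 := by ring
    by_cases hend : (k : Int) + 1 = n
    · have hnil : PySem.List.pyRange (2 * k + 1 + 2) (2 * n) 2 = [] := pyRange_two_nil _ _ (by omega)
      rw [hnil]
      have heq : (k : Int) ^ 2 + (2 * k + 1) = n ^ 2 := by rw [hsum, hend]
      simp only [pvA_loop, heq, List.map_cons, List.map_nil, join_singleton']
      simp [String.append_assoc]
    · have hk1' : (k : Int) + 1 < n := lt_of_le_of_ne (by omega) hend
      have hlt : ((k : Int) + 1) ^ 2 < n ^ 2 := by nlinarith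
      have hne : (k : Int) ^ 2 + (2 * k + 1) ≠ n ^ 2 := by rw [hsum]; exact hlt.ne
      simp only [pvA_loop, if_neg hne]
      have hk1 : ((k : Int) + 1) < n := by omega
      have hrec := ih n (k + 1) (rta ++ PySem.Int.toStr (2 * k + 1) ++ " + ") (by push_cast; omega) (by omega)
      have harg : (2 * ((k : Nat) + 1 : Nat) + 1 : Int) = 2 * k + 1 + 2 := by push_cast; ring
      rw [harg] at hrec
      have harg2 : (((k : Nat) + 1 : Nat) : Int) ^ 2 = (k : Int) ^ 2 + (2 * k + 1) := by push_cast; ring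
      rw [harg2] at hrec
      rw [hrec]
      simp only [List.map_cons]
      have hne2 : PySem.List.pyRange (2 * k + 1 + 2) (2 * n) 2 ≠ [] := by
        rw [pyRange_two_cons _ _ (by omega)]; simp
      rw [join_cons' " + " _ _ (by simpa using hne2)]
      simp [String.append_assoc]

-- ===== VERDICT (by name: the statement is the Claim_ definition above) =====
theorem verificar_curiosidad_matematica_spec : Claim_equal_verificar_curiosidad_matematica := by
  unfold Claim_equal_verificar_curiosidad_matematica
  intro n _
  unfold Spec_verificar_curiosidad_matematica verificar_curiosidad_matematica verificar_curiosidad_matematica_alt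
  by_cases hn : n ≤ 0
  · have hnil : PySem.List.pyRange 1 (n * 2) 2 = [] := pyRange_two_nil _ _ (by omega)
    simp [hnil, pvA_loop]
  · have hn1 : (0 : Int) < n := by omega
    have h2n : n * 2 = 2 * n := by ring
    have hne : PySem.List.pyRange 1 (n * 2) 2 ≠ [] := by
      rw [h2n, pyRange_two_cons 1 (2 * n) (by omega)]; simp
    have := loop_eq (n.toNat) n 0 "La suma n primeros números impares: " (by simpa using hn1) (by omega)
    simp only [Nat.cast_zero, mul_zero, zero_add, zero_pow, ne_eq, OfNat.ofNat_ne_zero,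
      not_false_eq_true] at this
    have hemp : (PySem.List.pyRange 1 (2 * n) 2).isEmpty = false := by
      rw [← h2n]; simp [List.isEmpty_eq_false_iff, hne]
    simp only [h2n]
    rw [this, hemp]
    simp
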